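-- pv_equiv track=rewrite | github.com/VigHub/advent-of-code | 2023/13/1.py | get_reflect
-- ===== SOURCE A (Python) =====
-- def get_reflect(v):
--     n = len(v)
--     for i in range(n-1):
--         for j in range(n):
--             if i-j < 0 or i+j+1 >= n:
--                 return i+1
--             if v[i-j] != v[i+j+1]:
--                 break
--     return None
-- ===== SOURCE B (Python) =====
-- def get_reflect(v):
--     n = len(v)
--     for i in range(n - 1):
--         if v[i] == v[i + 1]:
--             k = min(i + 1, n - 1 - i)
--             if v[i - k + 1:i + 1][::-1] == v[i + 1:i + 1 + k]:
--                 return i + 1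
--     return None
-- ===== Notes on version B (the rewrite author's own statement) =====
-- stated objective: alternative
-- what changed: A probes mirrored pairs one index at a time with a nested bounds-checked loop and break; B first filters candidate axes by the necessary condition v[i] == v[i+1] and then verifies each candidate with one slice comparison: reversed left window against the right window of the overlap length.
import Mathlib
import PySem

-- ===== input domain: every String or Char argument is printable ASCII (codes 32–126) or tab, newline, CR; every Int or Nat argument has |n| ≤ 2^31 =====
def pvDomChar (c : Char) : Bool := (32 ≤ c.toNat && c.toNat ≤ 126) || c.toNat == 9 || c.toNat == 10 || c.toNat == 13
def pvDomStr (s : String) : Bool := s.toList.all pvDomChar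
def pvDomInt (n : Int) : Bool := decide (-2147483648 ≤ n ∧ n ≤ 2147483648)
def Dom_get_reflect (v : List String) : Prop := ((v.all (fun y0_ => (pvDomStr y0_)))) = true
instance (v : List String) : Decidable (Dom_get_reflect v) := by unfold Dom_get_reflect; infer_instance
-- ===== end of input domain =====

-- B replaces A's hand-rolled index-by-index inner scan with a candidate filter
-- (adjacent rows equal) followed by one slice comparison of the reversed left window
-- against the right window (objective: alternative; same worst-case cost).

-- ===== PORT A =====
-- inner 'for j in range(n)' loop: fuel counts the remaining iterations, j the loop variable;
-- 'some r' = the function returns r, 'none' = break (or loop exhausted) → continue outer loop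
def innerA (v : List String) (n i : Int) : Nat → Int → Option Int
  | 0, _ => none
  | fuel + 1, j =>
    if i - j < 0 ∨ n ≤ i + j + 1 then some (i + 1)
    else if PySem.List.pyGet? v (i - j) ≠ PySem.List.pyGet? v (i + j + 1) then none
    else innerA v n i fuel (j + 1)

-- outer 'for i in range(n-1)' loop over the materialised range list
def outerA (v : List String) (n : Int) : List Int → Option Int
  | [] => none
  | i :: rest =>
    match innerA v n i n.toNat 0 with
    | some r => some r
    | none => outerA v n rest

def get_reflect (v : List String) : Option Int :=
  let n : Int := (v.length : Int)
  outerA v n (PySem.List.pyRange 0 (n - 1) 1)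

-- ===== PORT B =====
-- 'if v[i] == v[i + 1]'; v[i] on an in-range index ported as pyGet? compared on Option
-- (both indices are in range for every i the loop produces, so this is exact);
-- k = min(i+1, n-1-i); 'v[i-k+1:i+1][::-1] == v[i+1:i+1+k]'
-- (xs[::-1] is exactly List.reverse: PySem.List.slice?_none_none_neg_one)
def goB (v : List String) (n : Int) : List Int → Option Int
  | [] => none
  | i :: rest =>
    if PySem.List.pyGet? v i == PySem.List.pyGet? v (i + 1) then
      let k : Int := min (i + 1) (n - 1 - i)
      if (PySem.List.slice v (some (i - k + 1)) (some (i + 1))).reverse ==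
          PySem.List.slice v (some (i + 1)) (some (i + 1 + k)) then
        some (i + 1)
      else goB v n rest
    else goB v n rest

def get_reflect_alt (v : List String) : Option Int :=
  let n : Int := (v.length : Int)
  goB v n (PySem.List.pyRange 0 (n - 1) 1)

-- ===== PRECONDITION & SPEC =====
def Spec_get_reflect (v : List String) (out : Option Int) : Prop := out = get_reflect_alt v
instance (v : List String) (out : Option Int) : Decidable (Spec_get_reflect v out) := by unfold Spec_get_reflect; infer_instance

-- ===== CLAIM (what is proved, stated in full; the proofs are below) =====
def Claim_equal_get_reflect : Prop := ∀ (v : List String), Dom_get_reflect v → Spec_get_reflect v (get_reflect v)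

-- ===== LEMMAS AND PROOFS =====

-- A's inner loop at axis i, resumed at step j, decides whether every remaining mirrored
-- pair matches — i.e. whether the suffix (from j) of B's zipped pair list is all-equal.
lemma inner_eq (v : List String) (i' : Nat) (h : i' + 1 < v.length) :
    ∀ (fuel j : Nat), j ≤ min (i' + 1) (v.length - 1 - i') → v.length ≤ fuel + j →
      innerA v (v.length : Int) (i' : Int) fuel (j : Int) =
        (if ((((v.take (i' + 1)).reverse.drop j).zip ((v.drop (i' + 1)).drop j)).all
              (fun p => p.1 == p.2))
         then some ((i' : Int) + 1) else none) := by
  intro fuel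
  induction fuel with
  | zero => intro j hj hf; omega
  | succ fuel ih =>
    intro j hj hf
    by_cases hjm : j = min (i' + 1) (v.length - 1 - i')
    · -- boundary step: A returns i+1; the zipped suffix is empty so B's all is true
      have hcond : (i' : Int) - (j : Int) < 0 ∨ (v.length : Int) ≤ (i' : Int) + (j : Int) + 1 := by
        omega
      have hzip : ((v.take (i' + 1)).reverse.drop j).zip ((v.drop (i' + 1)).drop j) = [] := by
        apply List.eq_nil_of_length_eq_zero
        simp [List.length_zip]
        omega
      simp only [innerA, if_pos hcond, hzip, List.all_nil]
      simp
    · have hjlt : j < min (i' + 1) (v.length - 1 - i') := by omega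
      have hji : j ≤ i' := by omega
      have hrb : i' + 1 + j < v.length := by omega
      have hcond : ¬ ((i' : Int) - (j : Int) < 0 ∨ (v.length : Int) ≤ (i' : Int) + (j : Int) + 1) := by
        omega
      -- both pyGet? hits are in range
      have hidx1 : (i' : Int) - (j : Int) = ((i' - j : Nat) : Int) := by omega
      have hidx2 : (i' : Int) + (j : Int) + 1 = ((i' + j + 1 : Nat) : Int) := by omega
      have hlt1 : i' - j < v.length := by omega
      have hg1 : PySem.List.pyGet? v ((i' : Int) - (j : Int)) = some v[i' - j] := by
        rw [hidx1, PySem.List.pyGet?_natCast, List.getElem?_eq_getElem hlt1]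
      have hg2 : PySem.List.pyGet? v ((i' : Int) + (j : Int) + 1) = some v[i' + j + 1] := by
        rw [hidx2, PySem.List.pyGet?_natCast,
          List.getElem?_eq_getElem (by omega : i' + j + 1 < v.length)]
      -- unfold the heads of the two dropped lists
      have hlas : j < ((v.take (i' + 1)).reverse).length := by
        simp [List.length_reverse, List.length_take]; omega
      have hlbs : j < (v.drop (i' + 1)).length := by
        simp [List.length_drop]; omega
      have hdas : (v.take (i' + 1)).reverse.drop j =
          ((v.take (i' + 1)).reverse)[j] :: (v.take (i' + 1)).reverse.drop (j + 1) :=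
        List.drop_eq_getElem_cons hlas
      have hdbs : (v.drop (i' + 1)).drop j =
          (v.drop (i' + 1))[j] :: (v.drop (i' + 1)).drop (j + 1) :=
        List.drop_eq_getElem_cons hlbs
      have has : ((v.take (i' + 1)).reverse)[j]'hlas = v[i' - j] := by
        rw [List.getElem_reverse]
        simp only [List.getElem_take]
        congr 1
        simp [List.length_take]
        omega
      have hbs : (v.drop (i' + 1))[j]'hlbs = v[i' + 1 + j] := by
        rw [List.getElem_drop]
      simp only [innerA, if_neg hcond, hg1, hg2, hdas, hdbs, has, hbs,
        List.zip_cons_cons, List.all_cons]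
      by_cases heq : v[i' - j] = v[i' + j + 1]
      · have hb : (v[i' - j] == v[i' + 1 + j]) = true := by
          rw [beq_iff_eq]
          rw [heq]; congr 1; omega
        have : ¬ (some v[i' - j] ≠ some v[i' + j + 1]) := by simp [heq]
        rw [if_neg this]
        have hstep : (j : Int) + 1 = ((j + 1 : Nat) : Int) := by omega
        rw [hstep, ih (j + 1) (by omega) (by omega)]
        rw [hb, Bool.true_and]
      · have hb : (v[i' - j] == v[i' + 1 + j]) = false := by
          rw [beq_eq_false_iff_ne]
          intro hc; apply heq; rw [hc]; congr 1; omega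
        have : (some v[i' - j] ≠ some v[i' + j + 1]) := by simp [heq]
        rw [if_pos this]
        simp [hb]

-- a zipped all-equal test is equality of the overlapping prefixes
lemma zip_all_eq_take (xs ys : List String) :
    ((xs.zip ys).all fun p => p.1 == p.2) = (xs.take ys.length == ys.take xs.length) := by
  induction xs generalizing ys with
  | nil => simp
  | cons x xs ih =>
    cases ys with
    | nil => simp
    | cons y ys =>
      simp only [List.zip_cons_cons, List.all_cons, List.length_cons, List.take_succ_cons,
        List.cons_beq_cons, ih]

-- step through the shared outer range list
lemma outer_eq (v : List String) :
    ∀ l : List Int, (∀ i ∈ l, 0 ≤ i ∧ i + 1 < (v.length : Int)) →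
      outerA v (v.length : Int) l = goB v (v.length : Int) l := by
  intro l
  induction l with
  | nil => intro _; rfl
  | cons i rest ih =>
    intro hmem
    obtain ⟨h0, h1⟩ := hmem i (List.mem_cons_self)
    obtain ⟨i', rfl⟩ := Int.eq_ofNat_of_zero_le h0
    have hlen : i' + 1 < v.length := by exact_mod_cast (by omega : ((i' : Int) + 1) < (v.length : Int))
    have hi0 : i' < v.length := by omega
    have hrest : outerA v (v.length : Int) rest = goB v (v.length : Int) rest :=
      ih (fun x hx => hmem x (List.mem_cons_of_mem _ hx))
    have hin := inner_eq v i' hlen v.length 0 (by omega) (by omega)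
    simp only [Nat.cast_zero, List.drop_zero] at hin
    -- the guard v[i] == v[i+1] is the Option-level pyGet? comparison
    have hgu : (PySem.List.pyGet? v (i' : Int) == PySem.List.pyGet? v ((i' : Int) + 1)) =
        (v[i']'hi0 == v[i' + 1]'hlen) := by
      rw [show ((i' : Int) + 1) = (((i' + 1 : Nat)) : Int) by omega,
        PySem.List.pyGet?_natCast, PySem.List.pyGet?_natCast,
        List.getElem?_eq_getElem hi0, List.getElem?_eq_getElem hlen]
      simp
    -- head decomposition of the zipped pair list
    have hlas : 0 < ((v.take (i' + 1)).reverse).length := by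
      simp [List.length_take]; omega
    have hlbs : 0 < (v.drop (i' + 1)).length := by
      simp [List.length_drop]; omega
    have has0 : ((v.take (i' + 1)).reverse)[0]'hlas = v[i']'hi0 := by
      rw [List.getElem_reverse]
      simp only [List.getElem_take]
      congr 1
      simp [List.length_take]
      omega
    have hbs0 : (v.drop (i' + 1))[0]'hlbs = v[i' + 1]'hlen := by
      simp [List.getElem_drop]
    have hzipc : (((v.take (i' + 1)).reverse).zip (v.drop (i' + 1))) =
        (v[i']'hi0, v[i' + 1]'hlen) ::
          ((((v.take (i' + 1)).reverse).drop 1).zip ((v.drop (i' + 1)).drop 1)) := by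
      have hc1 := List.drop_eq_getElem_cons hlas
      have hc2 := List.drop_eq_getElem_cons hlbs
      simp only [List.drop_zero, Nat.zero_add] at hc1 hc2
      conv_lhs => rw [hc1, hc2]
      rw [List.zip_cons_cons, has0, hbs0]
    -- the slice window length k, as a natural number
    obtain ⟨m, hm⟩ : ∃ m, m = min (i' + 1) (v.length - 1 - i') := ⟨_, rfl⟩
    have hkm : min ((i' : Int) + 1) ((v.length : Int) - 1 - (i' : Int)) = ((m : Nat) : Int) := by
      omega
    have hslL : PySem.List.slice v (some ((i' : Int) - ((m : Nat) : Int) + 1)) (some ((i' : Int) + 1)) =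
        (v.drop (i' + 1 - m)).take m := by
      rw [show ((i' : Int) - ((m : Nat) : Int) + 1) = (((i' + 1 - m : Nat)) : Int) by omega,
        show ((i' : Int) + 1) = (((i' + 1 : Nat)) : Int) by omega,
        PySem.List.slice_natCast]
      congr 1
      omega
    have hslR : PySem.List.slice v (some ((i' : Int) + 1)) (some ((i' : Int) + 1 + ((m : Nat) : Int))) =
        (v.drop (i' + 1)).take m := by
      rw [show ((i' : Int) + 1 + ((m : Nat) : Int)) = (((i' + 1 + m : Nat)) : Int) by omega,
        show ((i' : Int) + 1) = (((i' + 1 : Nat)) : Int) by omega,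
        PySem.List.slice_natCast]
      congr 1
      omega
    -- B's slice comparison is the overlapping-prefix comparison of the zip test
    have htakeL : ((v.take (i' + 1)).reverse).take ((v.drop (i' + 1)).length) =
        ((v.drop (i' + 1 - m)).take m).reverse := by
      have hd : (v.take (i' + 1)).length - (v.drop (i' + 1)).length = i' + 1 - m := by
        simp only [List.length_take, List.length_drop]
        omega
      rw [List.take_reverse, hd, List.drop_take,
        show (i' + 1) - (i' + 1 - m) = m from by omega]
    have htakeR : (v.drop (i' + 1)).take (((v.take (i' + 1)).reverse).length) =
        (v.drop (i' + 1)).take m := by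
      rw [List.take_eq_take_iff]
      simp [List.length_take, List.length_drop]
      omega
    have hslice_eq : ((((v.drop (i' + 1 - m)).take m).reverse == (v.drop (i' + 1)).take m) : Bool) =
        ((((v.take (i' + 1)).reverse).zip (v.drop (i' + 1))).all fun p => p.1 == p.2) := by
      rw [zip_all_eq_take, htakeL, htakeR]
    -- assemble
    simp only [outerA, Int.toNat_natCast, hin, goB]
    rw [hgu, hkm, hslL, hslR, hslice_eq]
    simp only [hzipc, List.all_cons]
    by_cases hg : (v[i']'hi0 == v[i' + 1]'hlen) = true
    · rw [hg]
      simp only [Bool.true_and]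
      by_cases ht : ((((v.take (i' + 1)).reverse).drop 1).zip ((v.drop (i' + 1)).drop 1)).all
          (fun p => p.1 == p.2) = true
      · rw [ht]
        simp
      · have ht' : ((((v.take (i' + 1)).reverse).drop 1).zip ((v.drop (i' + 1)).drop 1)).all
            (fun p => p.1 == p.2) = false := by
          rwa [Bool.not_eq_true] at ht
        rw [ht']
        simp [hrest]
    · have hg' : (v[i']'hi0 == v[i' + 1]'hlen) = false := by
        rwa [Bool.not_eq_true] at hg
      rw [hg']
      simp [hrest]

-- ===== VERDICT (by name: the statement is the Claim_ definition above) =====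
theorem get_reflect_spec : Claim_equal_get_reflect := by
  intro v _
  unfold Spec_get_reflect get_reflect get_reflect_alt
  apply outer_eq
  intro i hi
  rw [PySem.List.mem_pyRange_one] at hi
  omega
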